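-- pv_equiv track=rewrite | github.com/SunggukCho/algorithm | 0223/BOJ_#1843방정식.py | condition2
-- ===== SOURCE A (Python) =====
-- from itertools import combinations_with_replacement, combinations
--
-- def condition2(n):  #조건 2. 약수
--     cnt = 0
--     divisor = submultiple(n)
--     comb = list(combinations_with_replacement(divisor, 3))
--     for i in comb:
--         x, y, z = i[0], i[1], i[2]
--         if x+y == z:
--             cnt += 1
--     return cnt
--
-- def submultiple(n): # 약수 구하는 함수
--     arr = [i for i in range(1, n + 1)]
--     result = []
--     for i in arr:
--         if n % i == 0:
--             result.append(i)
--     return result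
-- ===== SOURCE B (Python) =====
-- def condition2(n):
--     # Iterate divisor pairs x <= y and test x+y for membership in a divisor set;
--     # since x+y > y, each matching pair corresponds to exactly one triple of A.
--     divs = [i for i in range(1, n + 1) if n % i == 0]
--     ds = set(divs)
--     cnt = 0
--     rest = divs
--     while rest:
--         x = rest[0]
--         for y in rest:
--             if x + y in ds:
--                 cnt += 1
--         rest = rest[1:]
--     return cnt
-- ===== Notes on version B (the rewrite author's own statement) =====
-- stated objective: alternative
-- what changed: Instead of enumerating all combinations_with_replacement triples of divisors, B iterates only pairs x<=y of divisors and tests x+y for membership in a divisor set (valid because x+y>y, so the third component's position is determined).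
import Mathlib
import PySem

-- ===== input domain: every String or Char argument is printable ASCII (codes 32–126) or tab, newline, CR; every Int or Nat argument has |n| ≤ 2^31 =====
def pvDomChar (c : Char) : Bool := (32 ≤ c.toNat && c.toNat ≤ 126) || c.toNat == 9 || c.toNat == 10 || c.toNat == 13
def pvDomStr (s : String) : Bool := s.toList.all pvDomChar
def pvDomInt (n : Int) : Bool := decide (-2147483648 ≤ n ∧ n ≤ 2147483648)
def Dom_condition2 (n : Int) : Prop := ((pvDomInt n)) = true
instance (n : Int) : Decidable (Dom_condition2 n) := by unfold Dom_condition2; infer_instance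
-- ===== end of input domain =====

-- B replaces A's scan of all divisor triples by a scan of divisor pairs x ≤ y with a
-- set-membership test of x+y (objective: alternative; fewer combinations examined).

-- ===== PORT A =====
def submultiple (n : Int) : List Int :=
  let arr := PySem.List.pyRange 1 (n + 1) 1
  arr.foldl (fun result i => if PySem.Int.mod n i == 0 then result ++ [i] else result) []

-- itertools.combinations_with_replacement(l, 2): pairs (l[i], l[j]), i ≤ j, lexicographic
def cwr2 : List Int → List (Int × Int)
  | [] => []
  | x :: xs => (x :: xs).map (fun y => (x, y)) ++ cwr2 xs

-- itertools.combinations_with_replacement(l, 3): triples (l[i], l[j], l[k]), i ≤ j ≤ k, lexicographic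
def cwr3 : List Int → List (Int × Int × Int)
  | [] => []
  | x :: xs => (cwr2 (x :: xs)).map (fun p => (x, p.1, p.2)) ++ cwr3 xs

def condition2 (n : Int) : Int :=
  let divisor := submultiple n
  let comb := cwr3 divisor
  comb.foldl (fun cnt i => if i.1 + i.2.1 == i.2.2 then cnt + 1 else cnt) 0

-- ===== PORT B =====
-- the 'while rest:' loop of Source B
def condition2AltGo (ds : PySem.Set Int) (cnt : Int) : List Int → Int
  | [] => cnt
  | x :: xs =>
      condition2AltGo ds
        ((x :: xs).foldl (fun c y => if PySem.Set.contains ds (x + y) then c + 1 else c) cnt) xs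

def condition2_alt (n : Int) : Int :=
  let divs := (PySem.List.pyRange 1 (n + 1) 1).filter (fun i => PySem.Int.mod n i == 0)
  let ds : PySem.Set Int := PySem.Set.ofList divs
  condition2AltGo ds 0 divs

-- ===== PRECONDITION & SPEC =====
def Spec_condition2 (n : Int) (out : Int) : Prop := out = condition2_alt n
instance (n : Int) (out : Int) : Decidable (Spec_condition2 n out) := by unfold Spec_condition2; infer_instance

-- ===== CLAIM (what is proved, stated in full; the proofs are below) =====
def Claim_equal_condition2 : Prop := ∀ (n : Int), Dom_condition2 n → Spec_condition2 n (condition2 n)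

-- ===== LEMMAS AND PROOFS =====

-- B-side sum of per-tail pair counts, in Nat
def bsum (ds : List Int) : List Int → Nat
  | [] => 0
  | x :: xs => (x :: xs).countP (fun y => PySem.Set.contains ds (x + y)) + bsum ds xs

theorem condition2AltGo_eq (ds : List Int) (m : List Int) :
    ∀ cnt : Int, condition2AltGo ds cnt m = cnt + (bsum ds m : Int) := by
  induction m with
  | nil => intro cnt; simp [condition2AltGo, bsum]
  | cons x xs ih =>
      intro cnt
      rw [condition2AltGo, ih, PySem.List.foldl_if_add_one]
      simp [bsum]
      ring

-- occurrences of v in a suffix y :: ys of a strictly increasing L, for v > y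
theorem count_suffix (L : List Int) (hpw : L.Pairwise (· < ·)) (y : Int) (ys : List Int)
    (hsuf : (y :: ys) <:+ L) (v : Int) (hv : y < v) :
    (y :: ys).countP (fun z => v == z) = if v ∈ L then 1 else 0 := by
  have hnd : L.Nodup := (hpw.imp fun h => ne_of_lt h)
  have hnds : (y :: ys).Nodup := hnd.sublist hsuf.sublist
  have hmem : v ∈ (y :: ys) ↔ v ∈ L := by
    obtain ⟨t, ht⟩ := hsuf
    subst ht
    constructor
    · intro h; exact List.mem_append_right _ h
    · intro h
      rcases List.mem_append.mp h with h' | h'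
      · exfalso
        have := (List.pairwise_append.mp hpw).2.2 v h' y (List.mem_cons_self)
        omega
      · exact h'
  have hc : (y :: ys).countP (fun z => v == z) = (y :: ys).count v := by
    unfold List.count
    apply List.countP_congr
    intro z _
    rw [Bool.beq_comm (a := v) (b := z)]
  rw [hc]
  by_cases h : v ∈ (y :: ys)
  · rw [if_pos (hmem.mp h), List.count_eq_one_of_mem hnds h]
  · rw [if_neg (fun hL => h (hmem.mpr hL)), List.count_eq_zero_of_not_mem h]

theorem cwr2_count (L : List Int) (hpw : L.Pairwise (· < ·)) (x : Int) (hx : 0 < x) :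
    ∀ m : List Int, m <:+ L →
      (cwr2 m).countP (fun q => x + q.1 == q.2)
        = m.countP (fun y => PySem.Set.contains L (x + y)) := by
  intro m
  induction m with
  | nil => intro _; simp [cwr2]
  | cons y ys ih =>
      intro hsuf
      rw [cwr2, List.countP_append, List.countP_map]
      have hcomp : ((fun q : Int × Int => x + q.1 == q.2) ∘ (fun z => (y, z)))
          = (fun z => x + y == z) := rfl
      have h1 : ((y :: ys).countP (fun z => (x + y == z)))
          = if (x + y) ∈ L then 1 else 0 :=
        count_suffix L hpw y ys hsuf (x + y) (by omega)
      have h2 := ih ((List.suffix_cons y ys).trans hsuf)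
      have hcont : PySem.Set.contains L (x + y) = decide ((x + y) ∈ L) := by
        simp [PySem.Set.contains_eq_listContains]
      rw [hcomp, h1, h2, List.countP_cons, hcont]
      by_cases h : (x + y) ∈ L <;> simp [h] <;> omega

theorem cwr3_count (L : List Int) (hpw : L.Pairwise (· < ·)) (hpos : ∀ e ∈ L, 0 < e) :
    ∀ m : List Int, m <:+ L →
      (cwr3 m).countP (fun t => t.1 + t.2.1 == t.2.2) = bsum L m := by
  intro m
  induction m with
  | nil => intro _; simp [cwr3, bsum]
  | cons x xs ih =>
      intro hsuf
      rw [cwr3, List.countP_append, List.countP_map, bsum]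
      have hcomp : ((fun t : Int × Int × Int => t.1 + t.2.1 == t.2.2) ∘ (fun p : Int × Int => (x, p.1, p.2)))
          = (fun q : Int × Int => x + q.1 == q.2) := rfl
      have hx : 0 < x := hpos x (hsuf.subset List.mem_cons_self)
      have h1 := cwr2_count L hpw x hx (x :: xs) hsuf
      have h2 := ih ((List.suffix_cons x xs).trans hsuf)
      rw [hcomp, h1, h2]

theorem submultiple_eq_filter (n : Int) :
    submultiple n = (PySem.List.pyRange 1 (n + 1) 1).filter (fun i => PySem.Int.mod n i == 0) := by
  unfold submultiple
  rw [PySem.List.foldl_append_if_eq_filter]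
  simp

-- ===== VERDICT (by name: the statement is the Claim_ definition above) =====
theorem condition2_spec : Claim_equal_condition2 := by
  intro n _
  unfold Spec_condition2 condition2 condition2_alt
  set L := (PySem.List.pyRange 1 (n + 1) 1).filter (fun i => PySem.Int.mod n i == 0) with hL
  have hpw : L.Pairwise (· < ·) :=
    (PySem.List.pairwise_lt_pyRange_one 1 (n + 1)).filter _
  have hpos : ∀ e ∈ L, 0 < e := by
    intro e he
    have := (PySem.List.mem_pyRange_one.mp (List.mem_of_mem_filter he)).1
    omega
  have hnd : L.Nodup := (hpw.imp fun h => ne_of_lt h)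
  have hofl : PySem.Set.ofList L = L := PySem.Set.ofList_eq_self_of_nodup L hnd
  rw [submultiple_eq_filter, ← hL, PySem.List.foldl_if_add_one]
  show 0 + ((cwr3 L).countP (fun i => i.1 + i.2.1 == i.2.2) : Int)
      = condition2AltGo (PySem.Set.ofList L) 0 L
  rw [hofl, condition2AltGo_eq, cwr3_count L hpw hpos L (List.suffix_refl L)]
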